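-- pv_equiv track=rewrite | github.com/rupran/adventofcode | 2018/2.py | part_one
-- ===== SOURCE A (Python) =====
-- import collections
--
-- def part_one(line_gen):
--     twos = 0
--     threes = 0
--     for line in line_gen: # multi line input
--         count = collections.Counter(line)
--         twos += int(2 in count.values())
--         threes += int(3 in count.values())
--     return twos * threes
-- ===== SOURCE B (Python) =====
-- def _has_exact(s, k):
--     # eliminate one distinct character per step; no frequency table is built
--     while s:
--         c = s[0]
--         if s.count(c) == k:
--             return True
--         s = s.replace(c, '')
--     return False
--
-- def part_one(line_gen):
--     lines = list(line_gen)
--     return sum(_has_exact(l, 2) for l in lines) * sum(_has_exact(l, 3) for l in lines)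
-- ===== Notes on version B (the rewrite author's own statement) =====
-- stated objective: alternative
-- what changed: Replaces the single fold that builds a per-line Counter and tallies both totals by two staged passes using a distinct-character elimination loop: repeatedly take the first character, test whether its count equals k, and delete all its occurrences; no frequency table is ever built.
import Mathlib
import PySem

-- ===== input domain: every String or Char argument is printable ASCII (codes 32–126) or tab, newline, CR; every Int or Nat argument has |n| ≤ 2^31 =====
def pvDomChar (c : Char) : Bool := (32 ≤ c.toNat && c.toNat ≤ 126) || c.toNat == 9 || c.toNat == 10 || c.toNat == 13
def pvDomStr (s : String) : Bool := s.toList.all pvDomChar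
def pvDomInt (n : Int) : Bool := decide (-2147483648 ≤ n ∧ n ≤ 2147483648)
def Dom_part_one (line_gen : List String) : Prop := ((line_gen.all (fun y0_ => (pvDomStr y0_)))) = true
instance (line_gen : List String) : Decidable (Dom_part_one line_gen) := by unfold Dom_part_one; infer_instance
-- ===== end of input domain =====

-- B replaces the Counter-building fold by two staged passes over the lines, each using a
-- distinct-character elimination loop (test first char's count, then delete all its copies).

-- ===== PORT A =====
-- for line in line_gen: count = Counter(line); twos += int(2 in count.values()); threes += int(3 in count.values())
def part_one (line_gen : List String) : Int :=
  let r := line_gen.foldl (fun (tt : Int × Int) line =>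
    let count := PySem.Dict.counter line.toList
    (tt.1 + (if (2 : Int) ∈ count.values then 1 else 0),
     tt.2 + (if (3 : Int) ∈ count.values then 1 else 0))) (0, 0)
  r.1 * r.2

-- ===== PORT B =====
-- while s: c = s[0]; if s.count(c) == k: return True; s = s.replace(c, '')
def hasExact (k : Int) : List Char → Bool
  | [] => false
  | c :: t =>
    if ((c :: t).count c : Int) = k then true
    else hasExact k ((c :: t).filter (fun d => d ≠ c))
  termination_by s => s.length
  decreasing_by
    simp only [List.filter_cons, decide_eq_true_eq]
    simp only [ne_eq, not_true_eq_false, List.length_cons]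
    exact Nat.lt_succ_of_le (List.length_filter_le _ _)

-- lines = list(line_gen); sum(has_exact(l,2) for l in lines) * sum(has_exact(l,3) for l in lines)
def part_one_alt (line_gen : List String) : Int :=
  let lines := line_gen
  ((lines.map (fun l => if hasExact 2 l.toList then (1 : Int) else 0)).sum) *
  ((lines.map (fun l => if hasExact 3 l.toList then (1 : Int) else 0)).sum)

-- ===== PRECONDITION & SPEC =====
def Spec_part_one (line_gen : List String) (out : Int) : Prop := out = part_one_alt line_gen
instance (line_gen : List String) (out : Int) : Decidable (Spec_part_one line_gen out) := by unfold Spec_part_one; infer_instance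

-- ===== CLAIM (what is proved, stated in full; the proofs are below) =====
def Claim_equal_part_one : Prop := ∀ (line_gen : List String), Dom_part_one line_gen → Spec_part_one line_gen (part_one line_gen)

-- ===== LEMMAS AND PROOFS =====

/-- The elimination loop finds `k` iff some member's multiplicity is `k`. -/
lemma hasExact_iff (k : Int) (cs : List Char) :
    hasExact k cs = true ↔ ∃ d ∈ cs, (cs.count d : Int) = k := by
  induction hn : cs.length using Nat.strong_induction_on generalizing cs with
  | _ n ih =>
  cases cs with
  | nil => simp [hasExact]
  | cons c t =>
    rw [hasExact]
    by_cases hk : ((c :: t).count c : Int) = k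
    · simp only [hk, if_true, true_iff]
      exact ⟨c, List.mem_cons_self, hk⟩
    · simp only [hk, if_false]
      have hfl : ((c :: t).filter (fun d => d ≠ c)).length < n := by
        subst hn
        simp only [List.filter_cons, ne_eq, List.length_cons, decide_not]
        exact Nat.lt_succ_of_le (List.length_filter_le _ _)
      rw [ih _ hfl _ rfl]
      constructor
      · rintro ⟨d, hdm, hdk⟩
        have hdc : (d ≠ c) := by
          intro h; subst h
          have := (List.mem_filter.mp hdm).2
          simp at this
        have hdm' : d ∈ c :: t := List.mem_of_mem_filter hdm
        refine ⟨d, hdm', ?_⟩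
        rw [List.count_filter (by simp [hdc])] at hdk
        exact hdk
      · rintro ⟨d, hdm, hdk⟩
        by_cases hdc : d = c
        · subst hdc; exact absurd hdk hk
        · refine ⟨d, List.mem_filter.mpr ⟨hdm, by simp [hdc]⟩, ?_⟩
          rw [List.count_filter (by simp [hdc])]
          exact hdk

/-- Membership in `Counter(cs).values()` is multiplicity realisation. -/
lemma mem_counter_values_iff (cs : List Char) (k : Int) :
    (k ∈ (PySem.Dict.counter cs).values) ↔ ∃ d ∈ cs, ((cs.count d : Int) = k) := by
  have hv : (PySem.Dict.counter cs).values
      = ((PySem.Set.ofList cs).map (fun c => (c, (cs.count c : Int)))).map (·.2) := by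
    show ((PySem.Dict.counter cs).items).map (·.2) = _
    rw [PySem.Dict.items_counter]
  rw [hv, List.map_map]
  simp only [List.mem_map, Function.comp]
  constructor
  · rintro ⟨d, hdm, hk⟩
    exact ⟨d, (PySem.Set.mem_ofList _ _).mp hdm, hk⟩
  · rintro ⟨d, hdm, hk⟩
    exact ⟨d, (PySem.Set.mem_ofList _ _).mpr hdm, hk⟩

/-- A's paired fold computes the two indicator sums. -/
lemma foldl_pair_sum (L : List String) (f g : String → Int) (a b : Int) :
    L.foldl (fun (tt : Int × Int) l => (tt.1 + f l, tt.2 + g l)) (a, b)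
      = (a + (L.map f).sum, b + (L.map g).sum) := by
  induction L generalizing a b with
  | nil => simp
  | cons l t ih =>
    simp only [List.foldl_cons, List.map_cons, List.sum_cons, ih]
    simp [add_assoc]

-- ===== VERDICT (by name: the statement is the Claim_ definition above) =====
theorem part_one_spec : Claim_equal_part_one := by
  intro line_gen _
  unfold Spec_part_one part_one part_one_alt
  simp only
  rw [foldl_pair_sum line_gen
      (fun line => if (2 : Int) ∈ (PySem.Dict.counter line.toList).values then 1 else 0)
      (fun line => if (3 : Int) ∈ (PySem.Dict.counter line.toList).values then 1 else 0) 0 0]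
  simp only [zero_add]
  congr 1 <;>
  · congr 1
    exact List.map_congr_left (fun l _ => if_congr
      ((mem_counter_values_iff l.toList _).trans (hasExact_iff _ l.toList).symm) rfl rfl)
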